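-- pv_equiv track=rewrite | github.com/dachai1985/study | test-interview.py | balance_sorted_iterative
-- ===== SOURCE A (Python) =====
-- def balance_sorted_iterative(sorted_list):
--     list1 = []
--     list2 = []
--     for num in reversed(sorted_list):
--         if sum(list1) > sum(list2):
--             list1.append(num)
--         else:
--             list2.append(num)
--     return list1, list2
-- ===== SOURCE B (Python) =====
-- def balance_sorted_iterative(sorted_list):
--     # Stage 1: compute only the decision bits, driven by a single running
--     # difference d = sum(list1) - sum(list2); no lists are built here.
--     d = 0
--     decisions = []
--     for num in reversed(sorted_list):
--         if d > 0:
--             decisions.append(True)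
--             d += num
--         else:
--             decisions.append(False)
--             d -= num
--     # Stage 2: partition the reversed list according to the decision bits.
--     rev = list(reversed(sorted_list))
--     return ([x for x, c in zip(rev, decisions) if c],
--             [x for x, c in zip(rev, decisions) if not c])
-- ===== Notes on version B (the rewrite author's own statement) =====
-- stated objective: faster
-- what changed: B is a staged two-pass algorithm: pass 1 computes only the boolean decision sequence from a single running difference accumulator (sum1-sum2), without building any output list; pass 2 builds both partitions by zipping the reversed input with those decisions, whereas A re-sums both growing lists inside one building loop.
import Mathlib
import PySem

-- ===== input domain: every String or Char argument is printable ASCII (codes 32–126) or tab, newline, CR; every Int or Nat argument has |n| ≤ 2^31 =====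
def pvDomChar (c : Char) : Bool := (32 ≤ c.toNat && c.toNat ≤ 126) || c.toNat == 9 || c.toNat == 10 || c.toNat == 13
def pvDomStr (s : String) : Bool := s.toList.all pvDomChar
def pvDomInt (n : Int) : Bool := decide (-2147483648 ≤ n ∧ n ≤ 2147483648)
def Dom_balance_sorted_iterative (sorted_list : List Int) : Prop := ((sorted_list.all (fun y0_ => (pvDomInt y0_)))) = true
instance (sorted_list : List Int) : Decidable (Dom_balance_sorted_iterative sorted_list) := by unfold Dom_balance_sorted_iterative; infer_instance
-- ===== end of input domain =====

-- B is a staged two-pass algorithm (decision bits from one running difference, then a zip partition) replacing A's single building loop that re-sums both lists each step; O(n) instead of O(n^2).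

-- ===== PORT A =====
-- A: one loop over reversed(sorted_list), each step comparing sum(list1) > sum(list2) and appending
def balance_sorted_iterative (sorted_list : List Int) : List Int × List Int :=
  sorted_list.reverse.foldl
    (fun st num =>
      if st.1.sum > st.2.sum then (st.1 ++ [num], st.2) else (st.1, st.2 ++ [num]))
    ([], [])

-- ===== PORT B =====
-- B stage 1: fold over reversed list carrying (decision bits, running difference d = s1 - s2)
-- B stage 2: zip the reversed list with the decision bits and partition by the bit
def balance_sorted_iterative_alt (sorted_list : List Int) : List Int × List Int :=
  let rev := sorted_list.reverse
  let p := rev.foldl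
    (fun st num =>
      if st.2 > 0 then (st.1 ++ [true], st.2 + num) else (st.1 ++ [false], st.2 - num))
    (([] : List Bool), (0 : Int))
  let z := rev.zip p.1
  ((z.filter (fun q => q.2)).map (fun q => q.1),
   (z.filter (fun q => !q.2)).map (fun q => q.1))

-- ===== PRECONDITION & SPEC =====
def Spec_balance_sorted_iterative (sorted_list : List Int) (out : List Int × List Int) : Prop := out = balance_sorted_iterative_alt sorted_list
instance (sorted_list : List Int) (out : List Int × List Int) : Decidable (Spec_balance_sorted_iterative sorted_list out) := by unfold Spec_balance_sorted_iterative; infer_instance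

-- ===== CLAIM (what is proved, stated in full; the proofs are below) =====
def Claim_equal_balance_sorted_iterative : Prop := ∀ (sorted_list : List Int), Dom_balance_sorted_iterative sorted_list → Spec_balance_sorted_iterative sorted_list (balance_sorted_iterative sorted_list)

-- ===== LEMMAS AND PROOFS =====

-- the decision sequence produced from difference d, as a recursive function
def pvDecs (xs : List Int) (d : Int) : List Bool :=
  match xs with
  | [] => []
  | x :: r => if d > 0 then true :: pvDecs r (d + x) else false :: pvDecs r (d - x)

-- B's stage-1 fold accumulates exactly pvDecs
theorem foldB_decs (xs : List Int) (ds : List Bool) (d : Int) :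
    (xs.foldl
      (fun st num =>
        if st.2 > 0 then (st.1 ++ [true], st.2 + num) else (st.1 ++ [false], st.2 - num))
      (ds, d)).1 = ds ++ pvDecs xs d := by
  induction xs generalizing ds d with
  | nil => simp [pvDecs]
  | cons x r ih =>
    simp only [List.foldl_cons, pvDecs]
    by_cases h : d > 0 <;> simp [h, ih]

-- A's fold is the zip-partition of the input by pvDecs of the sum difference
theorem foldA_partition (xs l1 l2 : List Int) :
    xs.foldl
      (fun st num =>
        if st.1.sum > st.2.sum then (st.1 ++ [num], st.2) else (st.1, st.2 ++ [num]))
      (l1, l2) =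
    (l1 ++ ((xs.zip (pvDecs xs (l1.sum - l2.sum))).filter (fun q => q.2)).map (fun q => q.1),
     l2 ++ ((xs.zip (pvDecs xs (l1.sum - l2.sum))).filter (fun q => !q.2)).map (fun q => q.1)) := by
  induction xs generalizing l1 l2 with
  | nil => simp
  | cons x r ih =>
    have hd : (l1.sum > l2.sum) ↔ (l1.sum - l2.sum > 0) := by omega
    simp only [List.foldl_cons, pvDecs]
    by_cases h : l1.sum - l2.sum > 0
    · rw [if_pos (hd.mpr h), if_pos h]
      rw [ih (l1 ++ [x]) l2]
      simp [List.zip_cons_cons, show l1.sum + x - l2.sum = l1.sum - l2.sum + x from by ring]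
    · rw [if_neg (fun hh => h (hd.mp hh)), if_neg h]
      rw [ih l1 (l2 ++ [x])]
      simp [List.zip_cons_cons, show l1.sum - (l2.sum + x) = l1.sum - l2.sum - x from by ring]

-- ===== VERDICT (by name: the statement is the Claim_ definition above) =====
theorem balance_sorted_iterative_spec : Claim_equal_balance_sorted_iterative := by
  intro l _
  unfold Spec_balance_sorted_iterative balance_sorted_iterative balance_sorted_iterative_alt
  simp only [foldB_decs, List.nil_append]
  rw [foldA_partition]
  simp
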